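-- pv_equiv track=rewrite | github.com/nmateyko/human_5utr_modeling | hamming_distribution.py | max_run_py
-- ===== SOURCE A (Python) =====
-- from itertools import groupby
--
-- def max_run_py(seqs1, seqs2, min_len):
--   similar = []
--   for seq1 in seqs1:
--     for seq2 in seqs2:
--       equal = [int(i == j) for i, j in zip(seq1, seq2)]
--       if max(sum(1 for _ in l if n == 1) for n, l in groupby(equal)) >= min_len:
--         similar.append((seq1, seq2))
--   return similar
-- ===== SOURCE B (Python) =====
-- def max_run_py(seqs1, seqs2, min_len):
--   similar = []
--   for seq1 in seqs1:
--     for seq2 in seqs2: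
--       run = best = 0
--       for a, b in zip(seq1, seq2):
--         run = run + 1 if a == b else 0
--         if best < run:
--           best = run
--       if best >= min_len:
--         similar.append((seq1, seq2))
--   return similar
-- ===== Notes on version B (the rewrite author's own statement) =====
-- stated objective: simpler
-- what changed: Per pair, B replaces A's indicator-list construction + itertools.groupby + per-group generator sums + max() over groups with a single streaming pass over zip(seq1,seq2) carrying a current-run/best-run counter, allocating no intermediate lists or group objects.
import Mathlib
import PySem

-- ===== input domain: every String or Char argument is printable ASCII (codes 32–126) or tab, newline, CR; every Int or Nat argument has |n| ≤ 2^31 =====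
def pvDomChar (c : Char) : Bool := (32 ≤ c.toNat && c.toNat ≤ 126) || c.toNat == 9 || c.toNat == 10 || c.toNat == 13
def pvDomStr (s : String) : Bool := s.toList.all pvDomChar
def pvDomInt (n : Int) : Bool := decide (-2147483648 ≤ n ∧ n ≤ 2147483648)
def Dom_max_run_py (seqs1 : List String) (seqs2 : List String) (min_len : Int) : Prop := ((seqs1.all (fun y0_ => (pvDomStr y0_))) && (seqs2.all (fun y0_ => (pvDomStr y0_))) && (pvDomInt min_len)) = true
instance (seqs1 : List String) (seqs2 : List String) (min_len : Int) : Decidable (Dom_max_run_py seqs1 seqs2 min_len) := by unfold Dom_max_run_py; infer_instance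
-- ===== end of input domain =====

-- B replaces A's per-pair indicator list + itertools.groupby + per-group sums + max-over-groups
-- with a single streaming pass carrying a current-run/best-run counter (objective: simpler).

-- ===== PORT A =====
-- sum(1 for _ in l if n == 1)
def pvSumIf (n : Int) (l : List Int) : Int :=
  l.foldl (fun acc _ => acc + (if n == 1 then 1 else 0)) 0

-- one streaming step of itertools.groupby: carry the current (key, group) and the finished groups
def pvGbStep (st : Option (Int × List Int) × List (Int × List Int)) (x : Int) :
    Option (Int × List Int) × List (Int × List Int) :=
  match st with
  | (none, acc) => (some (x, [x]), acc)
  | (some (k, g), acc) =>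
      if x == k then (some (k, g ++ [x]), acc) else (some (x, [x]), acc ++ [(k, g)])

-- itertools.groupby(equal): maximal runs of equal elements, in order, as (key, group) pairs (exact)
def pvGroupby (l : List Int) : List (Int × List Int) :=
  match l.foldl pvGbStep ((none : Option (Int × List Int)), ([] : List (Int × List Int))) with
  | (none, acc) => acc
  | (some kg, acc) => acc ++ [kg]

-- Python max(...) over a sequence: none on the empty sequence (there Python raises ValueError)
def pvMax? (l : List Int) : Option Int :=
  match l with
  | [] => none
  | v :: vs => some (vs.foldl max v)

-- the inner-loop test of A; `none` is Python's ValueError, excluded by Pre_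
def pvATest (s1 s2 : String) (m : Int) : Bool :=
  let equal := (s1.toList.zip s2.toList).map (fun p => if p.1 == p.2 then (1 : Int) else 0)
  match pvMax? ((pvGroupby equal).map (fun g => pvSumIf g.1 g.2)) with
  | some v => decide (m ≤ v)
  | none => false

def max_run_py (seqs1 : List String) (seqs2 : List String) (min_len : Int) : List (String × String) :=
  seqs1.foldl (fun acc s1 =>
    seqs2.foldl (fun acc2 s2 =>
      if pvATest s1 s2 min_len then acc2 ++ [(s1, s2)] else acc2) acc) []

-- ===== PORT B =====
-- run = run + 1 if a == b else 0 ; if best < run: best = run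
def pvBStep (st : Int × Int) (p : Char × Char) : Int × Int :=
  let run := if p.1 == p.2 then st.1 + 1 else 0
  (run, if st.2 < run then run else st.2)

def pvBScan (s1 s2 : String) : Int × Int :=
  (s1.toList.zip s2.toList).foldl pvBStep (0, 0)

def max_run_py_alt (seqs1 : List String) (seqs2 : List String) (min_len : Int) : List (String × String) :=
  seqs1.foldl (fun acc s1 =>
    seqs2.foldl (fun acc2 s2 =>
      if min_len ≤ (pvBScan s1 s2).2 then acc2 ++ [(s1, s2)] else acc2) acc) []

-- ===== PRECONDITION & SPEC =====
-- Pre_ excludes exactly the inputs on which A raises ValueError (max() of an empty sequence):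
-- some pair (seq1, seq2) with an empty zip, i.e. an empty string paired with a partner from the
-- other list. (B simply returns the normal result there.)
def Pre_max_run_py (seqs1 : List String) (seqs2 : List String) (min_len : Int) : Prop :=
  ∀ s1 ∈ seqs1, ∀ s2 ∈ seqs2, 0 < s1.length ∧ 0 < s2.length
instance (seqs1 : List String) (seqs2 : List String) (min_len : Int) : Decidable (Pre_max_run_py seqs1 seqs2 min_len) := by unfold Pre_max_run_py; infer_instance

def pvWitness_max_run_py : List String × List String × Int := (["ab"], ["ab"], 2)

def Spec_max_run_py (seqs1 : List String) (seqs2 : List String) (min_len : Int) (out : List (String × String)) : Prop := out = max_run_py_alt seqs1 seqs2 min_len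
instance (seqs1 : List String) (seqs2 : List String) (min_len : Int) (out : List (String × String)) : Decidable (Spec_max_run_py seqs1 seqs2 min_len out) := by unfold Spec_max_run_py; infer_instance

-- ===== CLAIM (what is proved, stated in full; the proofs are below) =====
def Claim_equal_max_run_py : Prop := ∀ (seqs1 : List String) (seqs2 : List String) (min_len : Int), Dom_max_run_py seqs1 seqs2 min_len → Pre_max_run_py seqs1 seqs2 min_len → Spec_max_run_py seqs1 seqs2 min_len (max_run_py seqs1 seqs2 min_len)

-- ===== LEMMAS AND PROOFS =====

-- B's streaming step expressed on the 0/1 indicator value instead of the character pair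
def pvIStep (st : Int × Int) (x : Int) : Int × Int :=
  let run := if x == 1 then st.1 + 1 else 0
  (run, if st.2 < run then run else st.2)

-- pvSumIf computes: group length if the key is 1, else 0
lemma pvSumIf_eq (n : Int) (l : List Int) :
    pvSumIf n l = if n == 1 then (l.length : Int) else 0 := by
  have h : ∀ (l : List Int) (c : Int),
      List.foldl (fun acc _ => acc + (if n == 1 then (1:Int) else 0)) c l
        = c + (if n == 1 then (l.length : Int) else 0) := by
    intro l
    induction l with
    | nil => intro c; simp
    | cons y ys ih =>
        intro c
        rw [List.foldl_cons, ih]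
        split <;> (simp; try push_cast; try ring)
  unfold pvSumIf
  rw [h]
  simp

lemma pvSumIf_nonneg (n : Int) (l : List Int) : 0 ≤ pvSumIf n l := by
  rw [pvSumIf_eq]; split <;> positivity

-- fold max over a list of values, from 0
def pvM (l : List Int) : Int := l.foldl max 0

lemma pvM_append_singleton (l : List Int) (x : Int) : pvM (l ++ [x]) = max (pvM l) x := by
  simp [pvM, List.foldl_append]

lemma pvMax?_eq_pvM (l : List Int) (hne : l ≠ []) (h0 : ∀ x ∈ l, 0 ≤ x) :
    pvMax? l = some (pvM l) := by
  cases l with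
  | nil => exact absurd rfl hne
  | cons v vs =>
      have hv : 0 ≤ v := h0 v (by simp)
      simp only [pvMax?, pvM, List.foldl_cons]
      congr 1
      have : max 0 v = v := by omega
      rw [this]

-- the values A takes the max of
def pvVals (acc : List (Int × List Int)) : List Int := acc.map (fun g => pvSumIf g.1 g.2)

lemma pvVals_append (acc : List (Int × List Int)) (k : Int) (g : List Int) :
    pvVals (acc ++ [(k, g)]) = pvVals acc ++ [pvSumIf k g] := by
  simp [pvVals]

-- the main invariant: folding the rest of the indicator list through A's groupby machinery and
-- through B's run/best counter from matching states yields the same maximum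
lemma pvInv (e : List Int) (k : Int) (g : List Int) (acc : List (Int × List Int))
    (run best : Int)
    (hrun : run = (if k == 1 then (g.length : Int) else 0))
    (hbest : best = max (pvM (pvVals acc)) run) :
    pvMax? (pvVals (match e.foldl pvGbStep (some (k, g), acc) with
      | (none, acc') => acc'
      | (some kg, acc') => acc' ++ [kg]))
      = some ((e.foldl pvIStep (run, best)).2) := by
  induction e generalizing k g acc run best with
  | nil =>
      simp only [List.foldl_nil]
      rw [pvVals_append, pvMax?_eq_pvM _ (by simp) ?_, pvM_append_singleton]
      · congr 1
        rw [pvSumIf_eq, ← hrun, hbest]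
      · intro x hx
        rcases List.mem_append.mp hx with h | h
        · rcases List.mem_map.mp h with ⟨p, _, rfl⟩; exact pvSumIf_nonneg _ _
        · simp only [List.mem_singleton] at h; subst h; exact pvSumIf_nonneg _ _
  | cons x xs ih =>
      rw [List.foldl_cons, List.foldl_cons]
      have hg0 : (0:Int) ≤ run := by rw [hrun]; split <;> positivity
      by_cases hxk : x == k
      · -- same key: extend the current group
        have hx : x = k := by simpa using hxk
        simp only [pvGbStep, hxk, if_pos]
        apply ih
        · subst hx
          by_cases h1 : x == 1 <;> simp [h1] at hrun ⊢ <;> simp [pvIStep, hrun]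
        · subst hx
          by_cases h1 : x == 1 <;> simp [pvIStep, h1, hrun] at hbest ⊢ <;> omega
      · -- new key: close the current group
        simp only [pvGbStep, hxk]
        rw [if_neg (by simpa using hxk)]
        apply ih
        · by_cases h1 : x == 1
          · have hx1 : x = 1 := by simpa using h1
            have hxk' : x ≠ k := by simpa using hxk
            have hk1 : (k == 1) = false := by
              apply beq_eq_false_iff_ne.mpr
              intro h; exact hxk' (by rw [hx1, h])
            simp [pvIStep, h1, hrun, hk1]
          · simp [pvIStep, h1]
        · rw [pvVals_append, pvM_append_singleton, pvSumIf_eq, ← hrun]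
          simp only [pvIStep]
          by_cases h1 : x == 1 <;> simp only [h1] <;> simp [hbest] <;> omega

-- per-pair agreement of the two tests when the zip is nonempty
lemma pvTest_eq (s1 s2 : String) (m : Int) (h1 : s1 ≠ "") (h2 : s2 ≠ "") :
    pvATest s1 s2 m = decide (m ≤ (pvBScan s1 s2).2) := by
  have hz : s1.toList.zip s2.toList ≠ [] := by
    have e1 : s1.toList ≠ [] := fun h => h1 (String.toList_eq_nil_iff.mp h)
    have e2 : s2.toList ≠ [] := fun h => h2 (String.toList_eq_nil_iff.mp h)
    cases c1 : s1.toList with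
    | nil => exact absurd c1 e1
    | cons a as =>
        cases c2 : s2.toList with
        | nil => exact absurd c2 e2
        | cons b bs => simp [List.zip]
  -- B's fold over character pairs equals the indicator-value fold over the mapped list
  have hbridge : ∀ (z : List (Char × Char)) (st : Int × Int),
      z.foldl pvBStep st
        = (z.map (fun p => if p.1 == p.2 then (1 : Int) else 0)).foldl pvIStep st := by
    intro z st
    rw [List.foldl_map]
    apply PySem.List.foldl_congr_mem
    intro st' p _
    by_cases h : p.1 == p.2 <;> simp [pvBStep, pvIStep, h]
  unfold pvATest pvBScan
  rw [hbridge]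
  cases hc : (s1.toList.zip s2.toList).map (fun p => if p.1 == p.2 then (1 : Int) else 0) with
  | nil => exact absurd (List.map_eq_nil_iff.mp hc) hz
  | cons x xs =>
      simp only [pvGroupby, List.foldl_cons, pvGbStep]
      have hfirst : pvIStep (0, 0) x
          = ((if x == 1 then 1 else 0), max 0 (if x == 1 then (1:Int) else 0)) := by
        by_cases h1 : x == 1 <;> simp [pvIStep, h1]
      have hinv := pvInv xs x [x] [] (if x == 1 then 1 else 0) (max 0 (if x == 1 then (1:Int) else 0))
        (by by_cases h1 : x == 1 <;> simp [h1])
        (by simp [pvVals, pvM])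
      simp only [pvVals] at hinv
      rw [hinv]
      simp only [hfirst]

-- ===== VERDICT (by name: the statement is the Claim_ definition above) =====
theorem max_run_py_spec : Claim_equal_max_run_py := by
  intro seqs1 seqs2 min_len _ hpre
  unfold Spec_max_run_py max_run_py max_run_py_alt
  apply PySem.List.foldl_congr_mem
  intro acc s1 hs1
  apply PySem.List.foldl_congr_mem
  intro acc2 s2 hs2
  obtain ⟨h1, h2⟩ := hpre s1 hs1 s2 hs2
  rw [pvTest_eq s1 s2 min_len (by intro h; subst h; simp at h1) (by intro h; subst h; simp at h2)]
  by_cases h : min_len ≤ (pvBScan s1 s2).2 <;> simp [h]
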